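-- pv_equiv track=rewrite | github.com/khanhduong95/opentuxworld | scripts/switch_item.py | check_item_previous
-- ===== SOURCE A (Python) =====
-- def check_item_previous(own, item_number):
--     if item_number == 0:
--         return 0
--     elif item_number == 3 or item_number < 0:
--         if own["fish"] > 0:
--             return 3
--         else:
--             return check_item_previous(own, 2)
--     elif item_number == 2:
--         if own["ice"] > 0:
--             return 2
--         else:
--             return check_item_previous(own, 1)
--     else:
--         if own["snow"] > 0:
--             return 1
--         else:
--             return 0
-- ===== SOURCE B (Python) =====
-- def check_item_previous(own, item_number):
--     if item_number == 0:
--         return 0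
--     if item_number == 3 or item_number < 0:
--         start = 3
--     elif item_number == 2:
--         start = 2
--     else:
--         start = 1
--     table = {3: 'fish', 2: 'ice', 1: 'snow'}
--     for i in range(start, 0, -1):
--         if own[table[i]] > 0:
--             return i
--     return 0
-- ===== Notes on version B (the rewrite author's own statement) =====
-- stated objective: idiomatic
-- what changed: Replaces the self-recursive if/elif cascade with a start-rung mapping plus one iterative descending scan over a rung->key table, returning the first rung whose ownership count is positive.
import Mathlib
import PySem

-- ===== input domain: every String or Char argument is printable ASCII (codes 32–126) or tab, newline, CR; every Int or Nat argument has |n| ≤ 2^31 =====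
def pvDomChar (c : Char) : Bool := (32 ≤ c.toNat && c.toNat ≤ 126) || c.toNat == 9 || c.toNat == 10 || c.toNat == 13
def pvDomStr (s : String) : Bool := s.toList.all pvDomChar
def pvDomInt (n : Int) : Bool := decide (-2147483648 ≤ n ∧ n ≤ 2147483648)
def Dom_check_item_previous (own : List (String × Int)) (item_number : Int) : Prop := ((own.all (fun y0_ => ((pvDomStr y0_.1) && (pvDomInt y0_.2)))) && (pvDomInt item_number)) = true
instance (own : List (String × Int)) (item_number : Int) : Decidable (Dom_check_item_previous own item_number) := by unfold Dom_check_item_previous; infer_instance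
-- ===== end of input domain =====

-- B replaces A's self-recursive if/elif cascade with a start-rung mapping and one
-- iterative descending scan over a rung->key table (idiomatic; same behaviour, same cost).


-- ===== PORT A =====
-- own is a Python dict: association list, lookup = first match (exact via PySem.Dict.get?).
def ownGet? (own : List (String × Int)) (k : String) : Option Int :=
  (PySem.Dict.mk own).get? k

-- Literal port of A; Python's KeyError (missing key) is PySem's `none`, excluded by Pre_ below
-- (the `| none => 0` arms are unreachable under Pre_).
def check_item_previous (own : List (String × Int)) (item_number : Int) : Int :=
  if item_number = 0 then 0
  else if item_number = 3 ∨ item_number < 0 then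
    match ownGet? own "fish" with
    | some v => if v > 0 then 3 else check_item_previous own 2
    | none => 0
  else if item_number = 2 then
    match ownGet? own "ice" with
    | some v => if v > 0 then 2 else check_item_previous own 1
    | none => 0
  else
    match ownGet? own "snow" with
    | some v => if v > 0 then 1 else 0
    | none => 0
termination_by ((if item_number = 3 ∨ item_number < 0 then 3 else if item_number = 2 then 2 else 1 : Nat))
decreasing_by all_goals simp_all

-- ===== PORT B =====
-- table = {3:'fish', 2:'ice', 1:'snow'}
def altTable : PySem.Dict Int String := PySem.Dict.mk [(3, "fish"), (2, "ice"), (1, "snow")]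

-- the `for i in range(start, 0, -1)` loop with its early return; `none` arms = KeyError, unreachable under Pre_
def altScan (own : List (String × Int)) : List Int → Int
  | [] => 0
  | i :: rest =>
    match altTable.get? i with
    | none => 0
    | some k =>
      match ownGet? own k with
      | none => 0
      | some v => if v > 0 then i else altScan own rest

def check_item_previous_alt (own : List (String × Int)) (item_number : Int) : Int :=
  if item_number = 0 then 0
  else
    let start : Int :=
      if item_number = 3 ∨ item_number < 0 then 3
      else if item_number = 2 then 2
      else 1
    altScan own (PySem.List.pyRange start 0 (-1))

-- ===== PRECONDITION & SPEC =====
-- Pre_ excludes exactly the inputs on which Python A raises KeyError: the chain of dict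
-- accesses A performs (fish, then ice if fish≤0, then snow if ice≤0, as reached from
-- item_number's start rung) must all find their key.
def preSnowB (own : List (String × Int)) : Bool := (ownGet? own "snow").isSome
def preIceB (own : List (String × Int)) : Bool :=
  match ownGet? own "ice" with
  | none => false
  | some v => decide (v > 0) || preSnowB own
def preFishB (own : List (String × Int)) : Bool :=
  match ownGet? own "fish" with
  | none => false
  | some v => decide (v > 0) || preIceB own

def Pre_check_item_previous (own : List (String × Int)) (item_number : Int) : Prop :=
  (if item_number = 0 then true
   else if item_number = 3 ∨ item_number < 0 then preFishB own
   else if item_number = 2 then preIceB own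
   else preSnowB own) = true
instance (own : List (String × Int)) (item_number : Int) : Decidable (Pre_check_item_previous own item_number) := by unfold Pre_check_item_previous; infer_instance

def pvWitness_check_item_previous : (List (String × Int)) × Int := ([("snow", 1)], 1)

def Spec_check_item_previous (own : List (String × Int)) (item_number : Int) (out : Int) : Prop := out = check_item_previous_alt own item_number
instance (own : List (String × Int)) (item_number : Int) (out : Int) : Decidable (Spec_check_item_previous own item_number out) := by unfold Spec_check_item_previous; infer_instance

-- ===== CLAIM (what is proved, stated in full; the proofs are below) =====
def Claim_equal_check_item_previous : Prop := ∀ (own : List (String × Int)) (item_number : Int), Dom_check_item_previous own item_number → Pre_check_item_previous own item_number → Spec_check_item_previous own item_number (check_item_previous own item_number)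

-- ===== LEMMAS AND PROOFS =====
lemma range31 : PySem.List.pyRange 3 0 (-1) = [3, 2, 1] := by decide
lemma range21 : PySem.List.pyRange 2 0 (-1) = [2, 1] := by decide
lemma range11 : PySem.List.pyRange 1 0 (-1) = [1] := by decide

lemma tbl3 : altTable.get? 3 = some "fish" := by decide
lemma tbl2 : altTable.get? 2 = some "ice" := by decide
lemma tbl1 : altTable.get? 1 = some "snow" := by decide

-- one-step unfoldings of A at each rung
lemma A_eq1 (own : List (String × Int)) :
    check_item_previous own 1 =
      match ownGet? own "snow" with
      | some v => if v > 0 then 1 else 0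
      | none => 0 := by
  rw [check_item_previous]; norm_num

lemma A_eq2 (own : List (String × Int)) :
    check_item_previous own 2 =
      match ownGet? own "ice" with
      | some v => if v > 0 then 2 else check_item_previous own 1
      | none => 0 := by
  rw [check_item_previous]; norm_num

lemma A_eq3 (own : List (String × Int)) :
    check_item_previous own 3 =
      match ownGet? own "fish" with
      | some v => if v > 0 then 3 else check_item_previous own 2
      | none => 0 := by
  rw [check_item_previous]; norm_num

lemma A_eq_neg (own : List (String × Int)) (n : Int) (hn : n < 0) :
    check_item_previous own n = check_item_previous own 3 := by
  rw [check_item_previous, A_eq3]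
  have h0 : ¬ n = 0 := by omega
  simp [h0, hn]

lemma A_eq_other (own : List (String × Int)) (n : Int)
    (h0 : ¬ n = 0) (h3 : ¬ (n = 3 ∨ n < 0)) (h2 : ¬ n = 2) :
    check_item_previous own n = check_item_previous own 1 := by
  rw [check_item_previous, A_eq1]
  simp [h0, h3, h2]

lemma scan1 (own : List (String × Int)) (h : preSnowB own = true) :
    altScan own [1] = check_item_previous own 1 := by
  unfold preSnowB at h
  rw [A_eq1]
  cases hs : ownGet? own "snow" with
  | none => simp [hs] at h
  | some v => simp [altScan, tbl1, hs]

lemma scan2 (own : List (String × Int)) (h : preIceB own = true) :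
    altScan own [2, 1] = check_item_previous own 2 := by
  unfold preIceB at h
  rw [A_eq2]
  cases hi : ownGet? own "ice" with
  | none => simp [hi] at h
  | some v =>
    rw [hi] at h
    by_cases hv : v > 0
    · simp [altScan, tbl2, hi, hv]
    · have hsnow : preSnowB own = true := by simpa [hv] using h
      simp only [altScan, tbl2, hi, hv, if_false]
      exact scan1 own hsnow

lemma scan3 (own : List (String × Int)) (h : preFishB own = true) :
    altScan own [3, 2, 1] = check_item_previous own 3 := by
  unfold preFishB at h
  rw [A_eq3]
  cases hf : ownGet? own "fish" with
  | none => simp [hf] at h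
  | some v =>
    rw [hf] at h
    by_cases hv : v > 0
    · simp [altScan, tbl3, hf, hv]
    · have hice : preIceB own = true := by simpa [hv] using h
      simp only [altScan, tbl3, hf, hv, if_false]
      exact scan2 own hice

-- ===== VERDICT (by name: the statement is the Claim_ definition above) =====
theorem check_item_previous_spec : Claim_equal_check_item_previous := by
  intro own n _ hpre
  unfold Spec_check_item_previous check_item_previous_alt
  unfold Pre_check_item_previous at hpre
  by_cases h0 : n = 0
  · rw [h0, check_item_previous]; norm_num
  · by_cases h3 : n = 3 ∨ n < 0
    · simp only [if_neg h0, if_pos h3] at hpre ⊢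
      rw [range31, scan3 own hpre]
      rcases h3 with hn3 | hneg
      · rw [hn3]
      · rw [A_eq_neg own n hneg]
    · by_cases h2 : n = 2
      · simp only [if_neg h0, if_neg h3, if_pos h2] at hpre ⊢
        rw [range21, scan2 own hpre, h2]
      · simp only [if_neg h0, if_neg h3, if_neg h2] at hpre ⊢
        rw [range11, scan1 own hpre, A_eq_other own n h0 h3 h2]
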